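-- pv_equiv track=rewrite | github.com/Protonk/sandbox-boostrap | book/api/profile/_shared/encoder_trace.py | ranges_complement
-- ===== SOURCE A (Python) =====
-- from typing import Any, Dict, Iterable, List, Mapping, Optional, Tuple
--
-- def merge_ranges(ranges: Iterable[Tuple[int, int]]) -> List[Tuple[int, int]]:
--     merged: List[Tuple[int, int]] = []
--     for start, end in sorted(ranges):
--         if not merged:
--             merged.append((start, end))
--             continue
--         last_start, last_end = merged[-1]
--         if start <= last_end:
--             merged[-1] = (last_start, max(last_end, end))
--         else:
--             merged.append((start, end))
--     return merged
--
-- def ranges_complement(ranges: Iterable[Tuple[int, int]], window_len: int) -> List[Tuple[int, int]]: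
--     holes: List[Tuple[int, int]] = []
--     pos = 0
--     for start, end in merge_ranges(ranges):
--         if start > pos:
--             holes.append((pos, start))
--         pos = max(pos, end)
--     if pos < window_len:
--         holes.append((pos, window_len))
--     return holes
-- ===== SOURCE B (Python) =====
-- def ranges_complement(ranges, window_len):
--     # Single fused pass: no intermediate merged list; tracks the current
--     # group's end (last_end) and the running max of ends (pos).
--     holes = []
--     pos = 0
--     last_end = None
--     for start, end in sorted(ranges):
--         if last_end is None or start > last_end:
--             if start > pos:
--                 holes.append((pos, start))
--             last_end = end
--         else:
--             last_end = max(last_end, end)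
--         if end > pos:
--             pos = end
--     if pos < window_len:
--         holes.append((pos, window_len))
--     return holes
-- ===== Notes on version B (the rewrite author's own statement) =====
-- stated objective: simpler
-- what changed: Replaces the two-phase merge-then-gap (build a merged interval list, then scan it for gaps) with one fused pass over the sorted ranges that emits holes directly, tracking only the current group's end and the running max of ends, so no intermediate merged list is ever built.
import Mathlib
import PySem

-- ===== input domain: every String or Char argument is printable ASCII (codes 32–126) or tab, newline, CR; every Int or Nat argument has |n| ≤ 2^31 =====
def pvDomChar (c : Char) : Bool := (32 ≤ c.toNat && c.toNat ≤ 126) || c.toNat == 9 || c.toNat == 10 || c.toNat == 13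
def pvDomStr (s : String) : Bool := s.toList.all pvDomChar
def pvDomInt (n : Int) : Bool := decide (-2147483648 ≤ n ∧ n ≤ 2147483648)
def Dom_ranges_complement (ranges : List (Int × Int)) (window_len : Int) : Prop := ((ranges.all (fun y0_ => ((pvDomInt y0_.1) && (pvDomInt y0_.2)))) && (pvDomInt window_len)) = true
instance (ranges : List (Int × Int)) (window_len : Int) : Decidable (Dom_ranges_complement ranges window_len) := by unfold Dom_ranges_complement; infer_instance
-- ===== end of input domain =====

-- B fuses A's merge-then-gap two-phase scan into one pass over the sorted ranges (no
-- intermediate merged list); same return value everywhere, objective: simpler.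

-- ===== PORT A =====
-- one iteration of merge_ranges' loop body
def mergeStep (merged : List (Int × Int)) (r : Int × Int) : List (Int × Int) :=
  match merged.getLast? with
  | none => merged ++ [r]                                -- "if not merged: append"
  | some (last_start, last_end) =>
      if r.1 ≤ last_end then
        merged.dropLast ++ [(last_start, max last_end r.2)]   -- merged[-1] = (...)
      else
        merged ++ [r]

def merge_ranges (ranges : List (Int × Int)) : List (Int × Int) :=
  (PySem.List.sorted2 ranges (fun r => r.1) (fun r => r.2)).foldl mergeStep []

-- one iteration of the complement loop: state = (holes, pos)
def gapStep (st : List (Int × Int) × Int) (r : Int × Int) : List (Int × Int) × Int :=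
  ((if r.1 > st.2 then st.1 ++ [(st.2, r.1)] else st.1), max st.2 r.2)

def ranges_complement (ranges : List (Int × Int)) (window_len : Int) : List (Int × Int) :=
  let st := (merge_ranges ranges).foldl gapStep ([], 0)
  if st.2 < window_len then st.1 ++ [(st.2, window_len)] else st.1

-- ===== PORT B =====
-- one iteration of B's fused loop: state = (holes, pos, last_end : Option Int)
def fusedStep (st : List (Int × Int) × Int × Option Int) (r : Int × Int) : List (Int × Int) × Int × Option Int :=
  match st with
  | (holes, pos, lastEnd) =>
    match lastEnd with
    | none =>
        ((if r.1 > pos then holes ++ [(pos, r.1)] else holes), max pos r.2, some r.2)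
    | some le =>
        if r.1 > le then
          ((if r.1 > pos then holes ++ [(pos, r.1)] else holes), max pos r.2, some r.2)
        else
          (holes, max pos r.2, some (max le r.2))

def ranges_complement_alt (ranges : List (Int × Int)) (window_len : Int) : List (Int × Int) :=
  let st := (PySem.List.sorted2 ranges (fun r => r.1) (fun r => r.2)).foldl fusedStep ([], 0, none)
  if st.2.1 < window_len then st.1 ++ [(st.2.1, window_len)] else st.1

-- ===== PRECONDITION & SPEC =====
def Spec_ranges_complement (ranges : List (Int × Int)) (window_len : Int) (out : List (Int × Int)) : Prop := out = ranges_complement_alt ranges window_len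
instance (ranges : List (Int × Int)) (window_len : Int) (out : List (Int × Int)) : Decidable (Spec_ranges_complement ranges window_len out) := by unfold Spec_ranges_complement; infer_instance

-- ===== CLAIM (what is proved, stated in full; the proofs are below) =====
def Claim_equal_ranges_complement : Prop := ∀ (ranges : List (Int × Int)) (window_len : Int), Dom_ranges_complement ranges window_len → Spec_ranges_complement ranges window_len (ranges_complement ranges window_len)

-- ===== LEMMAS AND PROOFS =====

-- the abstraction of a merged list: B's fused state corresponding to it
def invOf (M : List (Int × Int)) : List (Int × Int) × Int × Option Int :=
  (((M.foldl gapStep ([], 0)).1, (M.foldl gapStep ([], 0)).2, (M.getLast?).map Prod.snd))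

-- one fused step simulates one merge step
lemma fusedStep_invOf (M : List (Int × Int)) (r : Int × Int) :
    fusedStep (invOf M) r = invOf (mergeStep M r) := by
  rcases M.eq_nil_or_concat with h | ⟨M', x, h⟩
  · subst h
    simp only [invOf, mergeStep, fusedStep, List.getLast?_nil, List.foldl_nil,
      Option.map_none, List.nil_append, List.foldl_cons]
    simp [gapStep]
  · subst h
    obtain ⟨ls, le⟩ := x
    rw [List.concat_eq_append]
    have h1 : invOf (M' ++ [(ls, le)]) =
        ((gapStep (M'.foldl gapStep ([], 0)) (ls, le)).1,
         (gapStep (M'.foldl gapStep ([], 0)) (ls, le)).2, some le) := by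
      simp [invOf, List.foldl_append]
    have hms : mergeStep (M' ++ [(ls, le)]) r =
        if r.1 ≤ le then M' ++ [(ls, max le r.2)] else (M' ++ [(ls, le)]) ++ [r] := by
      simp [mergeStep]
    by_cases hle : r.1 ≤ le
    · have h2 : invOf (M' ++ [(ls, max le r.2)]) =
          ((gapStep (M'.foldl gapStep ([], 0)) (ls, max le r.2)).1,
           (gapStep (M'.foldl gapStep ([], 0)) (ls, max le r.2)).2, some (max le r.2)) := by
        simp [invOf, List.foldl_append]
      have hngt : ¬ r.1 > le := by omega
      rw [hms, if_pos hle, h1, h2]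
      simp only [fusedStep, if_neg hngt, gapStep, Prod.mk.injEq]
      refine ⟨trivial, by omega, trivial⟩
    · have h3 : invOf ((M' ++ [(ls, le)]) ++ [r]) =
          ((gapStep (gapStep (M'.foldl gapStep ([], 0)) (ls, le)) r).1,
           (gapStep (gapStep (M'.foldl gapStep ([], 0)) (ls, le)) r).2, some r.2) := by
      -- spacer
        simp [invOf, List.foldl_append]
      have hgt : r.1 > le := by omega
      rw [hms, if_neg hle, h1, h3]
      simp only [fusedStep, if_pos hgt, gapStep]

-- the fused fold over any list simulates the merge fold
lemma fused_foldl_invOf (l : List (Int × Int)) (M : List (Int × Int)) :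
    l.foldl fusedStep (invOf M) = invOf (l.foldl mergeStep M) := by
  induction l generalizing M with
  | nil => rfl
  | cons r t ih => simp only [List.foldl_cons, fusedStep_invOf, ih]

-- ===== VERDICT (by name: the statement is the Claim_ definition above) =====
theorem ranges_complement_spec : Claim_equal_ranges_complement := by
  intro ranges window_len _
  unfold Spec_ranges_complement ranges_complement ranges_complement_alt merge_ranges
  have h := fused_foldl_invOf (PySem.List.sorted2 ranges (fun r => r.1) (fun r => r.2)) []
  have hinit : invOf [] = ([], 0, none) := rfl
  rw [hinit] at h
  rw [h]
  rfl
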